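-- pv_equiv track=rewrite | github.com/vujnovicmarko/Prevodenje_programskih_jezika | lab3/pomocne.py | svodljiv
-- ===== SOURCE A (Python) =====
-- def svodljiv(cvor_tip, pravilo_tip):
--     if "X" in pravilo_tip:
--         return svodljiv(cvor_tip, pravilo_tip.replace("X", "T")) or svodljiv(cvor_tip, pravilo_tip.replace("X", "const.T"))
--     if "T" in pravilo_tip:
--         return svodljiv(cvor_tip, pravilo_tip.replace("T", "int")) or svodljiv(cvor_tip, pravilo_tip.replace("T", "char"))
--     if cvor_tip == pravilo_tip:
--         return True
--     if cvor_tip == "int" and pravilo_tip == "const.int" or cvor_tip == "const.int" and pravilo_tip == "int":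
--         return True
--     if cvor_tip == "char" and pravilo_tip == "const.char" or cvor_tip == "const.char" and pravilo_tip == "char":
--         return True
--     if cvor_tip == "char" and pravilo_tip == "int":
--         return True
--     if cvor_tip == "niz.int" and pravilo_tip == "niz.const.int" or cvor_tip == "niz.char" and pravilo_tip == "niz.const.char":
--         return True
--
--     return False
-- ===== SOURCE B (Python) =====
-- def _matches(cvor, ground):
--     if cvor == ground:
--         return True
--     return (cvor, ground) in {
--         ("int", "const.int"), ("const.int", "int"),
--         ("char", "const.char"), ("const.char", "char"),
--         ("char", "int"),
--         ("niz.int", "niz.const.int"), ("niz.char", "niz.const.char"),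
--     }
--
--
-- def svodljiv(cvor_tip, pravilo_tip):
--     # Phase 1: generate all ground expansions of the rule type.
--     if "X" in pravilo_tip:
--         step1 = [pravilo_tip.replace("X", "T"), pravilo_tip.replace("X", "const.T")]
--     else:
--         step1 = [pravilo_tip]
--     grounds = []
--     for t in step1:
--         if "T" in t:
--             grounds.append(t.replace("T", "int"))
--             grounds.append(t.replace("T", "char"))
--         else:
--             grounds.append(t)
--     # Phase 2: test the node type against each ground expansion.
--     return any(_matches(cvor_tip, g) for g in grounds)
-- ===== Notes on version B (the rewrite author's own statement) =====
-- stated objective: simpler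
-- what changed: A recursively substitutes placeholders and retries itself; B has two flat phases: it first builds the list of up-to-4 ground expansions of pravilo_tip (X -> T/const.T, then T -> int/char) and then tests cvor_tip against each with a non-recursive matches predicate.
import Mathlib
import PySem

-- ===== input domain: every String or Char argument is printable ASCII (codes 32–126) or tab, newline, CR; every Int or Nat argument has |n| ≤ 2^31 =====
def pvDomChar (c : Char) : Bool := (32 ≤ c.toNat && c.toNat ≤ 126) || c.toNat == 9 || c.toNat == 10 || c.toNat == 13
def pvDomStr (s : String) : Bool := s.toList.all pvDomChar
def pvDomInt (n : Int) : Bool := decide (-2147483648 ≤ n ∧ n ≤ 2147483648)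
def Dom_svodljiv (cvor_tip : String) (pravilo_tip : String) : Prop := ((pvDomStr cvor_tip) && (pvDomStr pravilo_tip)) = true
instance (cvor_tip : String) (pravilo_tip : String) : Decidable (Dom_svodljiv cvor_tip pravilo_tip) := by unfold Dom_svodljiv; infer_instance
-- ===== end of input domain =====

-- B replaces A's recursive substitute-and-retry with two phases (generate the ≤4 ground
-- expansions of the rule type, then test each with a flat predicate); objective: simpler.

-- ===== PORT A =====
-- A's recursion always terminates within depth 3 (an X-step, then a T-step, then the base
-- comparison); the fuel argument of svodljivF is only a totality guard for that recursion.
def svodljivF : Nat → String → String → Bool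
  | 0, _, _ => false
  | (fuel+1), cvor_tip, pravilo_tip =>
    if PySem.Str.isIn "X" pravilo_tip then
      svodljivF fuel cvor_tip (PySem.Str.replace pravilo_tip "X" "T")
        || svodljivF fuel cvor_tip (PySem.Str.replace pravilo_tip "X" "const.T")
    else if PySem.Str.isIn "T" pravilo_tip then
      svodljivF fuel cvor_tip (PySem.Str.replace pravilo_tip "T" "int")
        || svodljivF fuel cvor_tip (PySem.Str.replace pravilo_tip "T" "char")
    else if cvor_tip = pravilo_tip then true
    else if (cvor_tip = "int" ∧ pravilo_tip = "const.int") ∨ (cvor_tip = "const.int" ∧ pravilo_tip = "int") then true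
    else if (cvor_tip = "char" ∧ pravilo_tip = "const.char") ∨ (cvor_tip = "const.char" ∧ pravilo_tip = "char") then true
    else if cvor_tip = "char" ∧ pravilo_tip = "int" then true
    else if (cvor_tip = "niz.int" ∧ pravilo_tip = "niz.const.int") ∨ (cvor_tip = "niz.char" ∧ pravilo_tip = "niz.const.char") then true
    else false

def svodljiv (cvor_tip : String) (pravilo_tip : String) : Bool :=
  svodljivF 3 cvor_tip pravilo_tip

-- ===== PORT B =====
def pvPairs : List (String × String) :=
  [("int", "const.int"), ("const.int", "int"),
   ("char", "const.char"), ("const.char", "char"),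
   ("char", "int"),
   ("niz.int", "niz.const.int"), ("niz.char", "niz.const.char")]

def pvMatches (cvor : String) (ground : String) : Bool :=
  if cvor = ground then true
  else decide ((cvor, ground) ∈ pvPairs)

def svodljiv_alt (cvor_tip : String) (pravilo_tip : String) : Bool :=
  let step1 :=
    if PySem.Str.isIn "X" pravilo_tip then
      [PySem.Str.replace pravilo_tip "X" "T", PySem.Str.replace pravilo_tip "X" "const.T"]
    else [pravilo_tip]
  let grounds := step1.foldl
    (fun acc t =>
      if PySem.Str.isIn "T" t then
        acc ++ [PySem.Str.replace t "T" "int", PySem.Str.replace t "T" "char"]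
      else acc ++ [t]) []
  grounds.any (fun g => pvMatches cvor_tip g)

-- ===== PRECONDITION & SPEC =====
def Spec_svodljiv (cvor_tip : String) (pravilo_tip : String) (out : Bool) : Prop := out = svodljiv_alt cvor_tip pravilo_tip
instance (cvor_tip : String) (pravilo_tip : String) (out : Bool) : Decidable (Spec_svodljiv cvor_tip pravilo_tip out) := by unfold Spec_svodljiv; infer_instance

-- ===== CLAIM (what is proved, stated in full; the proofs are below) =====
def Claim_equal_svodljiv : Prop := ∀ (cvor_tip : String) (pravilo_tip : String), Dom_svodljiv cvor_tip pravilo_tip → Spec_svodljiv cvor_tip pravilo_tip (svodljiv cvor_tip pravilo_tip)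

-- ===== LEMMAS AND PROOFS =====

-- replacing a SINGLE character c0 is a flatMap over the characters
theorem pvGoSingle (c0 : Char) (new : List Char) :
    ∀ (l acc : List Char) (fuel : Nat), l.length ≤ fuel →
      PySem.Chars.replace.go [c0] new fuel l acc
        = acc.reverse ++ l.flatMap (fun a => if a = c0 then new else [a]) := by
  intro l
  induction l with
  | nil =>
      intro acc fuel _
      cases fuel <;> simp [PySem.Chars.replace.go]
  | cons c t ih =>
      intro acc fuel hf
      cases fuel with
      | zero => simp at hf
      | succ f =>
          rw [PySem.Chars.replace.go]
          have hpre : List.isPrefixOf [c0] (c :: t) = (c0 == c) := by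
            simp [List.isPrefixOf]
          by_cases hc : c0 = c
          · subst hc
            rw [if_pos (by simp [hpre])]
            rw [show List.drop [c0].length (c0 :: t) = t from rfl]
            rw [ih (new.reverse ++ acc) f (by simpa using hf)]
            simp
          · rw [if_neg (by simp [hpre, hc])]
            rw [ih (c :: acc) f (by simpa using hf)]
            simp [if_neg (fun h : c = c0 => hc h.symm)]

theorem pvReplaceSingle (s : List Char) (c0 : Char) (new : List Char) :
    PySem.Chars.replace s [c0] new = s.flatMap (fun a => if a = c0 then new else [a]) := by
  rw [PySem.Chars.replace]
  rw [if_neg (by simp)]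
  rw [pvGoSingle c0 new s [] s.length le_rfl]
  simp

theorem pvSingletonInfix {α : Type} (a : α) (l : List α) : [a] <:+: l ↔ a ∈ l := by
  constructor
  · intro h; exact h.subset (List.mem_singleton_self a)
  · intro h
    obtain ⟨s, t, rfl⟩ := List.append_of_mem h
    exact ⟨s, t, by simp⟩

-- 'c in s' for a one-character needle, at the String level
theorem pvIsInSingle (a : Char) (sub s : String) (h : sub.toList = [a]) :
    PySem.Str.isIn sub s = decide (a ∈ s.toList) := by
  rw [PySem.Str.isIn_eq, h]
  rcases hb : decide (a ∈ s.toList) with _ | _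
  · simp at hb
    simp [PySem.Chars.isIn_eq_false_iff, pvSingletonInfix, hb]
  · simp at hb
    simp [PySem.Chars.isIn_iff_infix, pvSingletonInfix, hb]

theorem pvMemReplaceSingle (x : Char) (s : String) (c0 : Char) (old new : String)
    (hold : old.toList = [c0]) :
    x ∈ (PySem.Str.replace s old new).toList ↔
      ∃ y ∈ s.toList, (y = c0 ∧ x ∈ new.toList) ∨ (y ≠ c0 ∧ x = y) := by
  rw [PySem.Str.toList_replace, hold, pvReplaceSingle]
  simp only [List.mem_flatMap]
  constructor
  · rintro ⟨y, hy, hx⟩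
    by_cases h : y = c0
    · exact ⟨y, hy, Or.inl ⟨h, by simpa [h] using hx⟩⟩
    · exact ⟨y, hy, Or.inr ⟨h, by simpa [h] using hx⟩⟩
  · rintro ⟨y, hy, h | h⟩
    · exact ⟨y, hy, by simp [h.1, h.2]⟩
    · exact ⟨y, hy, by simp [h.1, h.2]⟩

-- no 'X' survives an X-substitution
theorem pvNoX_XT (p : String) : PySem.Str.isIn "X" (PySem.Str.replace p "X" "T") = false := by
  rw [pvIsInSingle 'X' _ _ rfl]
  simp only [decide_eq_false_iff_not]
  rw [pvMemReplaceSingle 'X' p 'X' "X" "T" rfl]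
  rintro ⟨y, _, h | h⟩
  · exact absurd h.2 (by decide)
  · exact h.1 h.2.symm

theorem pvNoX_XcT (p : String) : PySem.Str.isIn "X" (PySem.Str.replace p "X" "const.T") = false := by
  rw [pvIsInSingle 'X' _ _ rfl]
  simp only [decide_eq_false_iff_not]
  rw [pvMemReplaceSingle 'X' p 'X' "X" "const.T" rfl]
  rintro ⟨y, _, h | h⟩
  · exact absurd h.2 (by decide)
  · exact h.1 h.2.symm

theorem pvNoT_Tint (p : String) : PySem.Str.isIn "T" (PySem.Str.replace p "T" "int") = false := by
  rw [pvIsInSingle 'T' _ _ rfl]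
  simp only [decide_eq_false_iff_not]
  rw [pvMemReplaceSingle 'T' p 'T' "T" "int" rfl]
  rintro ⟨y, _, h | h⟩
  · exact absurd h.2 (by decide)
  · exact h.1 h.2.symm

theorem pvNoT_Tchar (p : String) : PySem.Str.isIn "T" (PySem.Str.replace p "T" "char") = false := by
  rw [pvIsInSingle 'T' _ _ rfl]
  simp only [decide_eq_false_iff_not]
  rw [pvMemReplaceSingle 'T' p 'T' "T" "char" rfl]
  rintro ⟨y, _, h | h⟩
  · exact absurd h.2 (by decide)
  · exact h.1 h.2.symm

-- a T-substitution introduces no 'X'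
theorem pvNoX_T (p : String) (new : String) (hnew : 'X' ∉ new.toList)
    (hX : PySem.Str.isIn "X" p = false) :
    PySem.Str.isIn "X" (PySem.Str.replace p "T" new) = false := by
  rw [pvIsInSingle 'X' _ _ rfl] at hX ⊢
  simp only [decide_eq_false_iff_not] at hX ⊢
  rw [pvMemReplaceSingle 'X' p 'T' "T" new rfl]
  rintro ⟨y, hy, h | h⟩
  · exact hnew h.2
  · exact hX (h.2 ▸ hy)


-- A's base chain (no X, no T left) is B's flat predicate
theorem pvChain (c p : String) :
    (if c = p then true
     else if (c = "int" ∧ p = "const.int") ∨ (c = "const.int" ∧ p = "int") then true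
     else if (c = "char" ∧ p = "const.char") ∨ (c = "const.char" ∧ p = "char") then true
     else if c = "char" ∧ p = "int" then true
     else if (c = "niz.int" ∧ p = "niz.const.int") ∨ (c = "niz.char" ∧ p = "niz.const.char") then true
     else false) = pvMatches c p := by
  unfold pvMatches pvPairs
  split_ifs with h1 h2 h3 h4 h5
  · rfl
  · simp only [List.mem_cons, List.not_mem_nil, or_false, Prod.mk.injEq,
      true_eq_decide_iff]
    rcases h2 with h | h
    · exact Or.inl h
    · exact Or.inr (Or.inl h)
  · simp only [List.mem_cons, List.not_mem_nil, or_false, Prod.mk.injEq,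
      true_eq_decide_iff]
    rcases h3 with h | h
    · exact Or.inr (Or.inr (Or.inl h))
    · exact Or.inr (Or.inr (Or.inr (Or.inl h)))
  · simp only [List.mem_cons, List.not_mem_nil, or_false, Prod.mk.injEq,
      true_eq_decide_iff]
    exact Or.inr (Or.inr (Or.inr (Or.inr (Or.inl h4))))
  · simp only [List.mem_cons, List.not_mem_nil, or_false, Prod.mk.injEq,
      true_eq_decide_iff]
    rcases h5 with h | h
    · exact Or.inr (Or.inr (Or.inr (Or.inr (Or.inr (Or.inl h)))))
    · exact Or.inr (Or.inr (Or.inr (Or.inr (Or.inr (Or.inr h)))))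
  · simp only [List.mem_cons, List.not_mem_nil, or_false, Prod.mk.injEq,
      false_eq_decide_iff]
    rintro (h | h | h | h | h | h | h)
    exacts [h2 (Or.inl h), h2 (Or.inr h), h3 (Or.inl h), h3 (Or.inr h),
      h4 h, h5 (Or.inl h), h5 (Or.inr h)]

theorem pvBaseGen (fuel : Nat) (c p : String) (hX : PySem.Str.isIn "X" p = false)
    (hT : PySem.Str.isIn "T" p = false) : svodljivF (fuel+1) c p = pvMatches c p := by
  rw [svodljivF, hX, hT]
  simp only [Bool.false_eq_true, if_false]
  exact pvChain c p

theorem pvTPhaseGen (fuel : Nat) (c p : String) (hX : PySem.Str.isIn "X" p = false) :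
    svodljivF (fuel+1+1) c p =
      (if PySem.Str.isIn "T" p then
        pvMatches c (PySem.Str.replace p "T" "int") || pvMatches c (PySem.Str.replace p "T" "char")
      else pvMatches c p) := by
  rcases hT : PySem.Str.isIn "T" p with _ | _
  · rw [pvBaseGen (fuel+1) c p hX hT]
    simp [hT]
  · rw [svodljivF, hX, hT]
    simp only [Bool.false_eq_true, if_false, if_true]
    rw [pvBaseGen fuel c _ (pvNoX_T p "int" (by decide) hX) (pvNoT_Tint p),
        pvBaseGen fuel c _ (pvNoX_T p "char" (by decide) hX) (pvNoT_Tchar p)]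

theorem pvTPhase2 (c p : String) (hX : PySem.Str.isIn "X" p = false) :
    svodljivF 2 c p =
      (if PySem.Str.isIn "T" p then
        pvMatches c (PySem.Str.replace p "T" "int") || pvMatches c (PySem.Str.replace p "T" "char")
      else pvMatches c p) := pvTPhaseGen 0 c p hX

theorem pvTPhase3 (c p : String) (hX : PySem.Str.isIn "X" p = false) :
    svodljivF 3 c p =
      (if PySem.Str.isIn "T" p then
        pvMatches c (PySem.Str.replace p "T" "int") || pvMatches c (PySem.Str.replace p "T" "char")
      else pvMatches c p) := pvTPhaseGen 1 c p hX

-- ===== VERDICT (by name: the statement is the Claim_ definition above) =====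
theorem svodljiv_spec : Claim_equal_svodljiv := by
  unfold Claim_equal_svodljiv
  intro c p _
  unfold Spec_svodljiv svodljiv_alt svodljiv
  rcases hX : PySem.Str.isIn "X" p with _ | _
  · simp only [hX, Bool.false_eq_true, if_false, List.foldl_cons, List.foldl_nil, List.nil_append]
    rw [pvTPhase3 c p hX]
    split_ifs with hT <;> simp
  · simp only [hX, if_true, List.foldl_cons, List.foldl_nil, List.nil_append]
    change svodljivF (2+1) c p = _
    rw [svodljivF, hX]
    simp only [if_true]
    rw [pvTPhase2 c _ (pvNoX_XT p), pvTPhase2 c _ (pvNoX_XcT p)]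
    split_ifs with h1 h2 h2 <;>
      simp only [List.nil_append, List.cons_append, List.any_cons, List.any_nil,
        Bool.or_false, Bool.or_assoc]
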